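-- pv_equiv track=rewrite | github.com/JicoHe/Class_Table | excel_to_ics.py | fold_ics_line
-- ===== SOURCE A (Python) =====
-- def fold_ics_line(line: str) -> str:
--     """
--     ICS 每行最多 75 字节，超过需要折行
--     折行为：
--         原行
--         空格开头继续内容
--     """
--     encoded = line.encode('utf-8')
--     if len(encoded) <= 75:
--         return line
--
--     folded = []
--     current = ""
--
--     for ch in line:
--         if len((current + ch).encode('utf-8')) > 75:
--             folded.append(current)
--             current = " " + ch  # 折行必须以空格开头
--         else:
--             current += ch
--     folded.append(current)
--     return "\r\n".join(folded)
-- ===== SOURCE B (Python) =====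
-- def fold_ics_line(line: str) -> str:
--     """ICS 75-byte folding for single-byte (ASCII) content: slice fixed-size
--     blocks arithmetically (75 chars, then 74-char blocks with a leading
--     space) instead of scanning character by character."""
--     if len(line) <= 75:
--         return line
--     parts = [line[:75]]
--     i = 75
--     while i < len(line):
--         parts.append(" " + line[i:i + 74])
--         i += 74
--     return "\r\n".join(parts)
-- ===== Notes on version B (the rewrite author's own statement) =====
-- stated objective: faster
-- what changed: B computes the fold arithmetically by fixed-size slicing (first 75 chars, then 74-char blocks prefixed by a space) instead of A's per-character scan that re-encodes the growing prefix at every step; this is exact on the claimed ASCII domain where every character is one UTF-8 byte.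
import Mathlib
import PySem

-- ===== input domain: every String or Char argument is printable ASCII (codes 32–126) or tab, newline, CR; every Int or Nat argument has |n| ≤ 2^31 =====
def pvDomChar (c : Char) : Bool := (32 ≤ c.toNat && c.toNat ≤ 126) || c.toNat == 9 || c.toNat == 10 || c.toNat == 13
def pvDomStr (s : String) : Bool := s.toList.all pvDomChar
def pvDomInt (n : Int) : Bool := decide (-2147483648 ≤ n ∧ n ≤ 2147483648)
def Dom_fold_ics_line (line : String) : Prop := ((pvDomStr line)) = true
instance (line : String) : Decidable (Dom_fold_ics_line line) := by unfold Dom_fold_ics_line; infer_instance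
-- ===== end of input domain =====

-- B replaces A's per-character scan (which re-encodes the growing prefix each step)
-- with arithmetic fixed-size slicing — first 75 chars, then 74-char blocks with a
-- leading space — exact on the claimed ASCII domain where each char is one UTF-8 byte.


-- ===== PORT A =====
-- len(….encode('utf-8')): exact hand port of UTF-8 byte length per code point
def utf8Len (c : Char) : Nat :=
  if c.toNat < 0x80 then 1 else if c.toNat < 0x800 then 2
  else if c.toNat < 0x10000 then 3 else 4

def bytesLen (l : List Char) : Nat := (l.map utf8Len).sum

-- A's loop body: state (folded, current), re-measures current ++ [ch] each step
def foldStepA (st : List (List Char) × List Char) (ch : Char) : List (List Char) × List Char :=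
  if bytesLen (st.2 ++ [ch]) > 75 then (st.1 ++ [st.2], [' ', ch])
  else (st.1, st.2 ++ [ch])

def fold_ics_line (line : String) : String :=
  if bytesLen line.toList ≤ 75 then line
  else
    let st := line.toList.foldl foldStepA ([], [])
    String.intercalate "\r\n" ((st.1 ++ [st.2]).map String.mk)

-- ===== PORT B =====
-- Source B's while loop: blocks of 74 chars (line[i:i+74]) prefixed by a space,
-- ported as structural recursion on the remaining suffix
def chunksB (l : List Char) : List (List Char) :=
  if l = [] then [] else (' ' :: l.take 74) :: chunksB (l.drop 74)
termination_by l.length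
decreasing_by
  have : 0 < l.length := List.length_pos_of_ne_nil (by assumption)
  simp [List.length_drop]; omega

def fold_ics_line_alt (line : String) : String :=
  let cs := line.toList
  if cs.length ≤ 75 then line
  else String.intercalate "\r\n" (((cs.take 75) :: chunksB (cs.drop 75)).map String.mk)

-- ===== PRECONDITION & SPEC =====
def Spec_fold_ics_line (line : String) (out : String) : Prop := out = fold_ics_line_alt line
instance (line : String) (out : String) : Decidable (Spec_fold_ics_line line out) := by unfold Spec_fold_ics_line; infer_instance

-- ===== CLAIM (what is proved, stated in full; the proofs are below) =====
def Claim_equal_fold_ics_line : Prop := ∀ (line : String), Dom_fold_ics_line line → Spec_fold_ics_line line (fold_ics_line line)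

-- ===== LEMMAS AND PROOFS =====
lemma utf8Len_of_dom (c : Char) (h : pvDomChar c = true) : utf8Len c = 1 := by
  unfold pvDomChar at h
  unfold utf8Len
  simp only [Bool.or_eq_true, Bool.and_eq_true, decide_eq_true_eq, beq_iff_eq] at h
  have : c.toNat < 0x80 := by omega
  simp [this]

lemma bytesLen_eq_length (l : List Char) (h : ∀ ch ∈ l, utf8Len ch = 1) :
    bytesLen l = l.length := by
  induction l with
  | nil => rfl
  | cons a t ih =>
    have := ih (fun ch hm => h ch (by simp [hm]))
    simp [bytesLen, h a (by simp)] at *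
    omega

lemma bytesLen_append_one (c : List Char) (ch : Char) :
    bytesLen (c ++ [ch]) = bytesLen c + utf8Len ch := by
  simp [bytesLen]

-- greedy per-char folding over 1-byte chars equals arithmetic slicing
lemma foldA_chunks (l : List Char) (f : List (List Char)) (c : List Char)
    (hl : ∀ ch ∈ l, utf8Len ch = 1) (hc : bytesLen c = c.length) (hc75 : c.length ≤ 75) :
    (l.foldl foldStepA (f, c)).1 ++ [(l.foldl foldStepA (f, c)).2] =
      if c.length + l.length ≤ 75 then f ++ [c ++ l]
      else f ++ ((c ++ l.take (75 - c.length)) :: chunksB (l.drop (75 - c.length))) := by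
  induction l generalizing f c with
  | nil =>
    simp [hc75]
  | cons ch t ih =>
    have hch : utf8Len ch = 1 := hl ch (by simp)
    have ht : ∀ x ∈ t, utf8Len x = 1 := fun x hx => hl x (by simp [hx])
    by_cases hlen : c.length + 1 ≤ 75
    · -- no break: current grows
      have hstep : foldStepA (f, c) ch = (f, c ++ [ch]) := by
        simp [foldStepA, bytesLen_append_one, hc, hch]; omega
      have hc' : bytesLen (c ++ [ch]) = (c ++ [ch]).length := by
        simp [bytesLen_append_one, hc, hch]
      have := ih f (c ++ [ch]) ht hc' (by simp; omega)
      simp only [List.foldl_cons, hstep]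
      rw [this]
      by_cases hfit : c.length + (t.length + 1) ≤ 75
      · rw [if_pos (by simp; omega), if_pos (by simp; omega)]
        simp
      · rw [if_neg (by simp; omega), if_neg (by simp; omega)]
        have htk : (ch :: t).take (75 - c.length) = ch :: t.take (75 - (c.length + 1)) := by
          have : 75 - c.length = (75 - (c.length + 1)) + 1 := by omega
          rw [this, List.take_succ_cons]
        have hdp : (ch :: t).drop (75 - c.length) = t.drop (75 - (c.length + 1)) := by
          have : 75 - c.length = (75 - (c.length + 1)) + 1 := by omega
          rw [this, List.drop_succ_cons]
        rw [htk, hdp]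
        simp
    · -- break: c.length = 75, start new chunk " " ++ ch
      have hc75' : c.length = 75 := by omega
      have hstep : foldStepA (f, c) ch = (f ++ [c], [' ', ch]) := by
        simp [foldStepA, bytesLen_append_one, hc, hch]; omega
      have hcb : bytesLen [' ', ch] = ([' ', ch] : List Char).length := by
        simp [bytesLen, hch]; decide
      have hIH := ih (f ++ [c]) [' ', ch] ht hcb (by simp)
      simp only [List.length_cons, List.length_nil, Nat.zero_add, Nat.reduceAdd,
        show (75 : Nat) - 2 = 73 from rfl, List.cons_append, List.nil_append] at hIH
      have hchB : chunksB (ch :: t) =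
          (' ' :: ch :: t.take 73) :: chunksB (t.drop 73) := by
        rw [chunksB.eq_def]
        simp [List.take_succ_cons, List.drop_succ_cons]
      have hcond : ¬ (c.length + (ch :: t).length ≤ 75) := by
        simp only [List.length_cons, hc75']; omega
      simp only [List.foldl_cons, hstep]
      by_cases hfit : 2 + t.length ≤ 75
      · rw [hIH, if_pos hfit, if_neg hcond]
        rw [show (75 : Nat) - c.length = 0 from by omega]
        simp only [List.take_zero, List.drop_zero, List.append_nil]
        rw [hchB]
        have ht73 : t.length ≤ 73 := by omega
        rw [List.take_of_length_le ht73, List.drop_of_length_le ht73,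
           show chunksB [] = [] from by rw [chunksB.eq_def]; simp]
        simp
      · rw [hIH, if_neg hfit, if_neg hcond]
        rw [show (75 : Nat) - c.length = 0 from by omega]
        simp only [List.take_zero, List.drop_zero, List.append_nil]
        rw [hchB]
        simp

-- ===== VERDICT (by name: the statement is the Claim_ definition above) =====
theorem fold_ics_line_spec : Claim_equal_fold_ics_line := by
  intro line hdom
  unfold Spec_fold_ics_line fold_ics_line fold_ics_line_alt
  have hasc : ∀ ch ∈ line.toList, utf8Len ch = 1 := by
    intro ch hm
    exact utf8Len_of_dom ch (by
      have := hdom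
      unfold Dom_fold_ics_line pvDomStr at this
      simpa using (List.all_eq_true.mp this ch hm))
  have hbl : bytesLen line.toList = line.toList.length := bytesLen_eq_length _ hasc
  have hlen : line.toList.length = line.length := by simp
  by_cases h : line.length ≤ 75
  · rw [hbl, hlen]; simp [h]
  · have hfold := foldA_chunks line.toList [] [] hasc rfl (by simp)
    rw [if_neg (by simp [hlen]; omega)] at hfold
    simp only [List.nil_append, List.length_nil, Nat.sub_zero] at hfold
    rw [hbl, hlen]
    rw [if_neg h, if_neg (by rw [hlen]; exact h)]
    simp only [hfold]
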